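-- pv_equiv track=rewrite | github.com/EVCHEPUCCYA/convaier | src/convaier/rag/chunker.py | _split_fixed
-- ===== SOURCE A (Python) =====
-- MAX_CHUNK_LINES = 60
--
-- OVERLAP_LINES = 5
--
-- def _split_fixed(lines: list[str]) -> list[tuple[int, int]]:
--     """Fall back to fixed-size chunks with overlap."""
--     ranges = []
--     i = 0
--     while i < len(lines):
--         end = min(i + MAX_CHUNK_LINES, len(lines))
--         ranges.append((i, end))
--         i = end - OVERLAP_LINES if end < len(lines) else end
--     return ranges
-- ===== SOURCE B (Python) =====
-- MAX_CHUNK_LINES = 60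
--
-- OVERLAP_LINES = 5
--
-- def _split_fixed(lines):
--     """Fall back to fixed-size chunks with overlap.
--
--     Built back-to-front: the start of the FINAL chunk is computed in closed
--     form (the smallest stride multiple whose chunk reaches the end), then the
--     chunks are emitted walking backwards by the stride and reversed; no
--     forward index with a clamped/early-stop advance is maintained.
--     """
--     n = len(lines)
--     if n == 0:
--         return []
--     step = MAX_CHUNK_LINES - OVERLAP_LINES
--     s = 0 if n <= MAX_CHUNK_LINES else step * ((n - MAX_CHUNK_LINES + step - 1) // step)
--     out = []
--     while s >= 0:
--         out.append((s, min(s + MAX_CHUNK_LINES, n)))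
--         s -= step
--     out.reverse()
--     return out
-- ===== Notes on version B (the rewrite author's own statement) =====
-- stated objective: alternative
-- what changed: Instead of a forward index loop with clamped ends and a conditional early-stop advance, B computes the start of the final chunk in closed form (ceil((n-60)/55)*55, 0 for short inputs), emits the chunks walking backwards by the stride and reverses the list.
import Mathlib
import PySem

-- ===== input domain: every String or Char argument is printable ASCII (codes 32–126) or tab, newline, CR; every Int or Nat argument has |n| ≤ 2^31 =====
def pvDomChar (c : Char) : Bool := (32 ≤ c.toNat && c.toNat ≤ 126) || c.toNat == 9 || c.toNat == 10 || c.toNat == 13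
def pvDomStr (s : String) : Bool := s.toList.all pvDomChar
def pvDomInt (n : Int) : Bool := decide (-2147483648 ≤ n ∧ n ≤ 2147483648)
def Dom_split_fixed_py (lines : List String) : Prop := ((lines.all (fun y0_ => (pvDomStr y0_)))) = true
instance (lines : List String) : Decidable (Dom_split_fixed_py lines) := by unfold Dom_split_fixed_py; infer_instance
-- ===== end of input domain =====

-- B builds the chunk list back-to-front from a closed-form start of the final chunk
-- instead of A's forward index loop (alternative decomposition, not claimed faster).

-- ===== PORT A =====
-- A's while-loop, recursing on the running index i; the Nat fuel only makes the
-- recursion structural (len(lines)+1 iterations always suffice: i advances each step)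
def splitFixedLoop (n : Int) : Nat → Int → List (Int × Int)
  | 0, _ => []
  | fuel + 1, i =>
    if i < n then
      let e := min (i + 60) n
      (i, e) :: splitFixedLoop n fuel (if e < n then e - 5 else e)
    else []

def split_fixed_py (lines : List String) : List (Int × Int) :=
  splitFixedLoop (lines.length : Int) (lines.length + 1) 0

-- ===== PORT B =====
-- Source B's backward while-loop: append the chunk at s, step s down by 55; fuel only
-- makes it structural (len(lines)+1 iterations suffice since s0 ≤ n)
def splitFixedBack (n : Int) : Nat → Int → List (Int × Int) → List (Int × Int)
  | 0, _, out => out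
  | fuel + 1, s, out =>
    if 0 ≤ s then splitFixedBack n fuel (s - 55) (out ++ [(s, min (s + 60) n)]) else out

def split_fixed_py_alt (lines : List String) : List (Int × Int) :=
  let n : Int := (lines.length : Int)
  if n = 0 then []
  else
    let s0 : Int := if n ≤ 60 then 0 else 55 * PySem.Int.floordiv (n - 60 + 55 - 1) 55
    (splitFixedBack n (lines.length + 1) s0 []).reverse

-- ===== PRECONDITION & SPEC =====
def Spec_split_fixed_py (lines : List String) (out : List (Int × Int)) : Prop := out = split_fixed_py_alt lines
instance (lines : List String) (out : List (Int × Int)) : Decidable (Spec_split_fixed_py lines out) := by unfold Spec_split_fixed_py; infer_instance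

-- ===== CLAIM (what is proved, stated in full; the proofs are below) =====
def Claim_equal_split_fixed_py : Prop := ∀ (lines : List String), Dom_split_fixed_py lines → Spec_split_fixed_py lines (split_fixed_py lines)

-- ===== LEMMAS AND PROOFS =====

theorem pyRange55_nil (a b : Int) (h : b ≤ a) : PySem.List.pyRange a b 55 = [] := by
  rw [PySem.List.pyRange_of_pos a b (by norm_num)]
  simp [show ¬ a < b by omega]

theorem pyRange55_cons (a b : Int) (h : a < b) :
    PySem.List.pyRange a b 55 = a :: PySem.List.pyRange (a + 55) b 55 := by
  rw [PySem.List.pyRange_of_pos a b (by norm_num),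
      PySem.List.pyRange_of_pos (a + 55) b (by norm_num)]
  rw [if_pos h]
  by_cases h2 : a + 55 < b
  · rw [if_pos h2]
    have hc : ((b - a + 55 - 1) / 55).toNat = ((b - (a + 55) + 55 - 1) / 55).toNat + 1 := by
      omega
    rw [hc, List.range_succ_eq_map, List.map_cons, List.map_map]
    congr 1
    · simp
    · exact List.map_congr_left (fun k _ => by simp [Function.comp]; ring)
  · rw [if_neg h2]
    have hc : ((b - a + 55 - 1) / 55).toNat = 1 := by omega
    simp [hc]

-- characterisation of A's loop as the ascending chunk list
theorem splitFixedLoop_eq (n : Int) (hn : 1 ≤ n) :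
    ∀ (fuel : Nat) (i : Int), (n - i).toNat ≤ fuel → 0 ≤ i → i < max (n - 5) 1 →
      splitFixedLoop n fuel i
        = (PySem.List.pyRange i (max (n - 5) 1) 55).map (fun s => (s, min (s + 60) n)) := by
  intro fuel
  induction fuel with
  | zero => intro i hk hi0 hiM; omega
  | succ fuel ih =>
    intro i hk hi0 hiM
    have hin : i < n := by omega
    rw [splitFixedLoop, if_pos hin, pyRange55_cons i _ hiM, List.map_cons]
    show (i, min (i + 60) n) ::
        splitFixedLoop n fuel (if min (i + 60) n < n then min (i + 60) n - 5 else min (i + 60) n) = _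
    by_cases he : min (i + 60) n < n
    · have he' : min (i + 60) n = i + 60 := by omega
      rw [if_pos he, he']
      have : i + 60 - 5 = i + 55 := by ring
      rw [this]
      congr 1
      exact ih (i + 55) (by omega) (by omega) (by omega)
    · have he' : min (i + 60) n = n := by omega
      rw [if_neg he, he']
      cases fuel with
      | zero => rw [splitFixedLoop, pyRange55_nil (i + 55) _ (by omega)]; simp
      | succ f => rw [splitFixedLoop, if_neg (by omega), pyRange55_nil (i + 55) _ (by omega)]; simp

theorem splitFixedBack_neg (n : Int) (fuel : Nat) (s : Int) (out : List (Int × Int)) (h : s < 0) :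
    splitFixedBack n fuel s out = out := by
  cases fuel with
  | zero => rfl
  | succ f => rw [splitFixedBack, if_neg (by omega)]

-- characterisation of B's backward loop: the descending chunk list, appended to out
theorem splitFixedBack_eq (n : Int) :
    ∀ (fuel k : Nat) (out : List (Int × Int)), k + 1 ≤ fuel →
      splitFixedBack n fuel (55 * (k : Int)) out
        = out ++ ((List.range (k + 1)).map
            (fun (j : Nat) => ((55 * (j : Int) : Int), min (55 * (j : Int) + 60) n))).reverse := by
  intro fuel
  induction fuel with
  | zero => intro k out hf; omega
  | succ fuel ih =>
    intro k out hf
    rw [splitFixedBack, if_pos (by positivity)]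
    cases k with
    | zero =>
      rw [show (55 * ((0 : Nat) : Int) - 55 : Int) = -55 by norm_num,
          splitFixedBack_neg n fuel (-55) _ (by norm_num)]
      simp
    | succ k' =>
      have hs : 55 * ((k' + 1 : Nat) : Int) - 55 = 55 * (k' : Int) := by push_cast; ring
      rw [hs, ih k' _ (by omega)]
      simp [List.range_succ]
-- ===== VERDICT (by name: the statement is the Claim_ definition above) =====
theorem split_fixed_py_spec : Claim_equal_split_fixed_py := by
  intro lines _
  unfold Spec_split_fixed_py split_fixed_py split_fixed_py_alt
  set n : Int := (lines.length : Int) with hdefn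
  by_cases h0 : n = 0
  · simp only [h0, if_pos]
    rw [show lines.length + 1 = 1 by omega]
    rw [splitFixedLoop, if_neg (by omega)]
  · have hn1 : 1 ≤ n := by omega
    simp only [if_neg h0]
    -- the closed-form start is 55 * k0 for the Nat k0 below
    set k0 : Nat := (if n ≤ 60 then (0 : Int) else PySem.Int.floordiv (n - 60 + 55 - 1) 55).toNat with hk0
    have hfd : ¬ n ≤ 60 → PySem.Int.floordiv (n - 60 + 55 - 1) 55 = (n - 6) / 55 := by
      intro h
      rw [PySem.Int.floordiv_eq_ediv_of_pos (by norm_num)]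
      have : n - 60 + 55 - 1 = n - 6 := by ring
      rw [this]
    have hs0 : (if n ≤ 60 then (0 : Int) else 55 * PySem.Int.floordiv (n - 60 + 55 - 1) 55)
        = 55 * (k0 : Int) := by
      by_cases h : n ≤ 60
      · simp [hk0, h]
      · rw [if_neg h, hfd h, hk0, if_neg h, hfd h]
        omega
    rw [hs0, splitFixedBack_eq n (lines.length + 1) k0 []
          (by
            rw [hk0]
            by_cases h : n ≤ 60
            · simp [h]
            · rw [if_neg h, hfd h]; omega),
        List.nil_append, List.reverse_reverse]
    rw [splitFixedLoop_eq n hn1 (lines.length + 1) 0 (by omega) le_rfl (by omega)]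
    rw [PySem.List.pyRange_of_pos 0 (max (n - 5) 1) (by norm_num), if_pos (by omega)]
    have hcnt : ((max (n - 5) 1 - 0 + 55 - 1) / 55).toNat = k0 + 1 := by
      rw [hk0]
      by_cases h : n ≤ 60
      · simp only [if_pos h]; omega
      · rw [if_neg h, hfd h]; omega
    rw [hcnt, List.map_map]
    exact List.map_congr_left (fun j _ => by simp [Function.comp])
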